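-- pv_equiv track=rewrite | github.com/veerabadralokesh/cs2510 | chatsystem/server/storage/data_store.py | compare_vector_timestamps
-- ===== SOURCE A (Python) =====
-- def compare_vector_timestamps(timestamp1, timestamp2):
--     comparison_dict = {"less":0, "greater":0, "equal":0}
--     for key in timestamp1:
--         if timestamp1[key] < timestamp2[key]:
--             comparison_dict["less"] += 1
--         elif timestamp1[key] > timestamp2[key]:
--             comparison_dict["greater"] += 1
--         else:
--             comparison_dict["equal"] += 1
--     if comparison_dict["less"] > 0 and comparison_dict["greater"] == 0:
--         return 0 # return (message1, message2) # message1 is older than message2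
--     if comparison_dict["less"] == 0 and comparison_dict["greater"] > 0:
--         return 1 # return (message2, message1) # message2 is older than message1
-- ===== SOURCE B (Python) =====
-- def compare_vector_timestamps(timestamp1, timestamp2):
--     has_less = any(timestamp1[k] < timestamp2[k] for k in timestamp1)
--     has_greater = any(timestamp1[k] > timestamp2[k] for k in timestamp1)
--     if has_less and not has_greater:
--         return 0
--     if has_greater and not has_less:
--         return 1
-- ===== Notes on version B (the rewrite author's own statement) =====
-- stated objective: simpler
-- what changed: Replaces the counting dict (less/greater/equal tallies built in one pass) with two short-circuiting existence scans (any '<', any '>') combined by boolean logic; the unused 'equal' tally disappears.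
import Mathlib
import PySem

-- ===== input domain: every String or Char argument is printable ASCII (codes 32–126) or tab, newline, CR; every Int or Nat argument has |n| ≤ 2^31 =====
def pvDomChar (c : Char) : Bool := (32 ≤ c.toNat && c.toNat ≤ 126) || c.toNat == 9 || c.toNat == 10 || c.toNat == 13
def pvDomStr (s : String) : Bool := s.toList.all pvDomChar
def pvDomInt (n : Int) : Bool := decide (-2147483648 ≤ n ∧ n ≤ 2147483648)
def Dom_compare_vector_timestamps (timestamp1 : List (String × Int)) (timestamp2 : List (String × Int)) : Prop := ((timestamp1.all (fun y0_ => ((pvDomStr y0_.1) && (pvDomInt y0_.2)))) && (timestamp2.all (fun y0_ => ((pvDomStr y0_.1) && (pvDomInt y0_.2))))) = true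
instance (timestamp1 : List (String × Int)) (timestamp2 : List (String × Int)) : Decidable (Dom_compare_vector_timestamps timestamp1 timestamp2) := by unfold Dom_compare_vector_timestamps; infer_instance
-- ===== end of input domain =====

-- B replaces A's counting dict with two existence scans (any '<', any '>') combined by
-- boolean logic, dropping the unused 'equal' tally; objective: simpler.

-- ===== PORT A =====
-- Literal port of A: build the counting dict over the keys of timestamp1 (as a Python
-- dict), then decide from the "less"/"greater" tallies.  Inside Pre_ every key of
-- timestamp1 is present in timestamp2, so getD _ 0 is the exact dict lookup.
def compare_vector_timestamps (timestamp1 : List (String × Int)) (timestamp2 : List (String × Int)) : Option Int :=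
  let d1 := PySem.Dict.ofList timestamp1
  let d2 := PySem.Dict.ofList timestamp2
  let cd := d1.keys.foldl (fun cd k =>
      if d1.getD k 0 < d2.getD k 0 then cd.modify "less" 0 (· + 1)
      else if d1.getD k 0 > d2.getD k 0 then cd.modify "greater" 0 (· + 1)
      else cd.modify "equal" 0 (· + 1))
    (PySem.Dict.ofList [("less", 0), ("greater", 0), ("equal", 0)] : PySem.Dict String Int)
  if cd.getD "less" 0 > 0 && cd.getD "greater" 0 == 0 then some 0
  else if cd.getD "less" 0 == 0 && cd.getD "greater" 0 > 0 then some 1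
  else none

-- ===== PORT B =====
def compare_vector_timestamps_alt (timestamp1 : List (String × Int)) (timestamp2 : List (String × Int)) : Option Int :=
  let d1 := PySem.Dict.ofList timestamp1
  let d2 := PySem.Dict.ofList timestamp2
  let has_less := d1.keys.any (fun k => d1.getD k 0 < d2.getD k 0)
  let has_greater := d1.keys.any (fun k => d1.getD k 0 > d2.getD k 0)
  if has_less && !has_greater then some 0
  else if has_greater && !has_less then some 1
  else none

-- ===== PRECONDITION & SPEC =====
-- Pre_ excludes exactly the inputs where some key of timestamp1 is absent from
-- timestamp2: there Python's timestamp2[key] raises KeyError.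
def Pre_compare_vector_timestamps (timestamp1 : List (String × Int)) (timestamp2 : List (String × Int)) : Prop :=
  (timestamp1.all (fun p => timestamp2.any (fun q => q.1 == p.1))) = true
instance (timestamp1 : List (String × Int)) (timestamp2 : List (String × Int)) : Decidable (Pre_compare_vector_timestamps timestamp1 timestamp2) := by unfold Pre_compare_vector_timestamps; infer_instance

def pvWitness_compare_vector_timestamps : (List (String × Int)) × (List (String × Int)) :=
  ([("a", 1), ("b", 5)], [("a", 2), ("b", 1)])

def Spec_compare_vector_timestamps (timestamp1 : List (String × Int)) (timestamp2 : List (String × Int)) (out : Option Int) : Prop := out = compare_vector_timestamps_alt timestamp1 timestamp2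
instance (timestamp1 : List (String × Int)) (timestamp2 : List (String × Int)) (out : Option Int) : Decidable (Spec_compare_vector_timestamps timestamp1 timestamp2 out) := by unfold Spec_compare_vector_timestamps; infer_instance

-- ===== CLAIM (what is proved, stated in full; the proofs are below) =====
def Claim_equal_compare_vector_timestamps : Prop := ∀ (timestamp1 : List (String × Int)) (timestamp2 : List (String × Int)), Dom_compare_vector_timestamps timestamp1 timestamp2 → Pre_compare_vector_timestamps timestamp1 timestamp2 → Spec_compare_vector_timestamps timestamp1 timestamp2 (compare_vector_timestamps timestamp1 timestamp2)

-- ===== LEMMAS AND PROOFS =====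

-- After A's counting loop, the "less" tally is the number of keys with '<' and the
-- "greater" tally the number with 'not < and >' (the elif), on top of the start values.
theorem pv_counts (d1 d2 : PySem.Dict String Int)
    (l : List String) (cd : PySem.Dict String Int) :
    ((l.foldl (fun cd k =>
        if d1.getD k 0 < d2.getD k 0 then cd.modify "less" 0 (· + 1)
        else if d1.getD k 0 > d2.getD k 0 then cd.modify "greater" 0 (· + 1)
        else cd.modify "equal" 0 (· + 1)) cd).getD "less" 0
       = cd.getD "less" 0 + l.countP (fun k => decide (d1.getD k 0 < d2.getD k 0)))
  ∧ ((l.foldl (fun cd k =>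
        if d1.getD k 0 < d2.getD k 0 then cd.modify "less" 0 (· + 1)
        else if d1.getD k 0 > d2.getD k 0 then cd.modify "greater" 0 (· + 1)
        else cd.modify "equal" 0 (· + 1)) cd).getD "greater" 0
       = cd.getD "greater" 0 + l.countP (fun k => decide (¬ d1.getD k 0 < d2.getD k 0 ∧ d1.getD k 0 > d2.getD k 0))) := by
  induction l generalizing cd with
  | nil => simp
  | cons k l ih =>
    by_cases h1 : d1.getD k 0 < d2.getD k 0
    · refine ⟨?_, ?_⟩
      · rw [List.foldl_cons, if_pos h1, (ih _).1, PySem.Dict.getD_modify_self, List.countP_cons]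
        simp [h1]; omega
      · rw [List.foldl_cons, if_pos h1, (ih _).2,
            PySem.Dict.getD_modify_of_ne _ _ _ (by decide), List.countP_cons]
        simp [h1]
    · by_cases h2 : d1.getD k 0 > d2.getD k 0
      · refine ⟨?_, ?_⟩
        · rw [List.foldl_cons, if_neg h1, if_pos h2, (ih _).1,
              PySem.Dict.getD_modify_of_ne _ _ _ (by decide), List.countP_cons]
          simp [h1]
        · rw [List.foldl_cons, if_neg h1, if_pos h2, (ih _).2,
              PySem.Dict.getD_modify_self, List.countP_cons]
          simp [h1, h2]; omega
      · refine ⟨?_, ?_⟩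
        · rw [List.foldl_cons, if_neg h1, if_neg h2, (ih _).1,
              PySem.Dict.getD_modify_of_ne _ _ _ (by decide), List.countP_cons]
          simp [h1]
        · rw [List.foldl_cons, if_neg h1, if_neg h2, (ih _).2,
              PySem.Dict.getD_modify_of_ne _ _ _ (by decide), List.countP_cons]
          simp [h1, h2]

-- ===== VERDICT (by name: the statement is the Claim_ definition above) =====
theorem compare_vector_timestamps_spec : Claim_equal_compare_vector_timestamps := by
  intro t1 t2 _ _
  unfold Spec_compare_vector_timestamps compare_vector_timestamps compare_vector_timestamps_alt
  set d1 := PySem.Dict.ofList t1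
  set d2 := PySem.Dict.ofList t2
  obtain ⟨hl, hg⟩ := pv_counts d1 d2 d1.keys
      (PySem.Dict.ofList [("less", 0), ("greater", 0), ("equal", 0)] : PySem.Dict String Int)
  have hcond : (fun k => decide (¬ d1.getD k 0 < d2.getD k 0 ∧ d1.getD k 0 > d2.getD k 0))
      = (fun k => decide (d1.getD k 0 > d2.getD k 0)) := by
    funext k
    by_cases h : d1.getD k 0 > d2.getD k 0
    · have : ¬ d1.getD k 0 < d2.getD k 0 := by omega
      simp [h, this]
    · simp [h]
  rw [hcond] at hg
  dsimp only
  simp only [hl, hg]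
  have hl0 : (PySem.Dict.ofList [("less", (0:Int)), ("greater", 0), ("equal", 0)]).getD "less" 0 = 0 := by decide
  have hg0 : (PySem.Dict.ofList [("less", (0:Int)), ("greater", 0), ("equal", 0)]).getD "greater" 0 = 0 := by decide
  set fL : String → Bool := fun k => decide (d1.getD k 0 < d2.getD k 0)
  set fG : String → Bool := fun k => decide (d1.getD k 0 > d2.getD k 0)
  have hAL : d1.keys.any fL = decide (0 < d1.keys.countP fL) := by
    by_cases h : 0 < d1.keys.countP fL
    · simp only [h, decide_true]
      exact List.any_eq_true.mpr (List.countP_pos_iff.mp h)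
    · simp only [h, decide_false]
      rw [List.any_eq_false]
      intro x hx hfx
      exact h (List.countP_pos_iff.mpr ⟨x, hx, hfx⟩)
  have hAG : d1.keys.any fG = decide (0 < d1.keys.countP fG) := by
    by_cases h : 0 < d1.keys.countP fG
    · simp only [h, decide_true]
      exact List.any_eq_true.mpr (List.countP_pos_iff.mp h)
    · simp only [h, decide_false]
      rw [List.any_eq_false]
      intro x hx hfx
      exact h (List.countP_pos_iff.mpr ⟨x, hx, hfx⟩)
  have e1 : decide ((PySem.Dict.ofList [("less", (0:Int)), ("greater", 0), ("equal", 0)]).getD "less" 0 + ↑(d1.keys.countP fL) > 0) = d1.keys.any fL := by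
    rw [hl0, hAL]; exact decide_eq_decide.mpr (by omega)
  have e2 : ((PySem.Dict.ofList [("less", (0:Int)), ("greater", 0), ("equal", 0)]).getD "less" 0 + ↑(d1.keys.countP fL) == 0) = !d1.keys.any fL := by
    rw [hl0, hAL]
    by_cases h : 0 < d1.keys.countP fL
    · simp [h]
      exact List.countP_pos_iff.mp h
    · simp [h]
      intro a ha
      simpa using (List.countP_eq_zero.mp (Nat.eq_zero_of_not_pos h)) a ha
  have e3 : decide ((PySem.Dict.ofList [("less", (0:Int)), ("greater", 0), ("equal", 0)]).getD "greater" 0 + ↑(d1.keys.countP fG) > 0) = d1.keys.any fG := by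
    rw [hg0, hAG]; exact decide_eq_decide.mpr (by omega)
  have e4 : ((PySem.Dict.ofList [("less", (0:Int)), ("greater", 0), ("equal", 0)]).getD "greater" 0 + ↑(d1.keys.countP fG) == 0) = !d1.keys.any fG := by
    rw [hg0, hAG]
    by_cases h : 0 < d1.keys.countP fG
    · simp [h]
      exact List.countP_pos_iff.mp h
    · simp [h]
      intro a ha
      simpa using (List.countP_eq_zero.mp (Nat.eq_zero_of_not_pos h)) a ha
  rw [e1, e2, e3, e4]
  cases d1.keys.any fL <;> cases d1.keys.any fG <;> simp
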